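-- pv_equiv track=rewrite | github.com/Fadinrsultan/Master-Thesis | financial_data/Alternative_research /alt_v2.py | pick_latest_by_period
-- ===== SOURCE A (Python) =====
-- def pick_latest_by_period(rows):
--     """Return dict {period_end: row} choosing the latest 'filed' per period."""
--     best = {}
--     for r in rows:
--         end = r.get("end")
--         filed = r.get("filed", "")
--         if not end:
--             continue
--         if end not in best or filed > best[end].get("filed", ""):
--             best[end] = r
--     return best
-- ===== SOURCE B (Python) =====
-- def pick_latest_by_period(rows):
--     """Return dict {period_end: row} choosing the latest 'filed' per period."""
--     groups = {}
--     for r in rows: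
--         end = r.get("end")
--         if end:
--             groups.setdefault(end, []).append(r)
--     return {end: max(g, key=lambda r: r.get("filed", "")) for end, g in groups.items()}
-- ===== Notes on version B (the rewrite author's own statement) =====
-- stated objective: alternative
-- what changed: Replaced the streaming running-best dict reduction by a two-pass group-then-reduce: first build a dict mapping each truthy end to the list of its rows, then pick max(group, key=filed) per group (max keeps the first maximal row, matching A's strict '>').
import Mathlib
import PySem

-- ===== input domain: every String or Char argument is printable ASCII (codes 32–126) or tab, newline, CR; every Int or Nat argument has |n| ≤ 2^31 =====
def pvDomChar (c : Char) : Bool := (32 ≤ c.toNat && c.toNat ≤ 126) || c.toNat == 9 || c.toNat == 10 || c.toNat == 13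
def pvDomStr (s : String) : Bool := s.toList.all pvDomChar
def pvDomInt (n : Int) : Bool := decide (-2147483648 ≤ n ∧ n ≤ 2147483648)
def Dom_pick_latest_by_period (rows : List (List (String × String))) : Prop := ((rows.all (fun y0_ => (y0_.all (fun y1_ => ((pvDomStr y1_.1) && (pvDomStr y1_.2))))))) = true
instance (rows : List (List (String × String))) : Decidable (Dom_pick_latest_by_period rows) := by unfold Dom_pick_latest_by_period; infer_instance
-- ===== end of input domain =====

-- B regroups the rows by 'end' first and then reduces each group with a first-maximal max by 'filed'; same O(n) cost, different (two-pass) decomposition.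

-- helper: r.get("filed", "") -- shared by both ports
def pvFiled (r : List (String × String)) : String := (PySem.Dict.mk r).getD "filed" ""

-- ===== PORT A =====
def pick_latest_by_period (rows : List (List (String × String))) : List (String × List (String × String)) :=
  (rows.foldl
    (fun best r =>
      let filed := pvFiled r
      match (PySem.Dict.mk r).get? "end" with
      | none => best                        -- end is None: continue
      | some e =>
        if e = "" then best                 -- end falsy: continue
        else
          match best.get? e with
          | none => best.insert e r         -- end not in best
          | some b => if pvFiled b < filed then best.insert e r else best)
    PySem.Dict.empty).items

-- ===== PORT B =====
-- max(g, key=lambda r: r.get("filed","")) : first maximal element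
def pvMaxByFiled (g : List (List (String × String))) : List (String × String) :=
  match g with
  | [] => []
  | h :: t => t.foldl (fun b x => if pvFiled b < pvFiled x then x else b) h

def pick_latest_by_period_alt (rows : List (List (String × String))) : List (String × List (String × String)) :=
  ((rows.foldl
      (fun d r =>
        match (PySem.Dict.mk r).get? "end" with
        | none => d
        | some e => if e = "" then d else d.modify e [] (· ++ [r]))   -- groups.setdefault(end, []).append(r)
      PySem.Dict.empty).items).map (fun p => (p.1, pvMaxByFiled p.2))

-- ===== PRECONDITION & SPEC =====
def Spec_pick_latest_by_period (rows : List (List (String × String))) (out : List (String × List (String × String))) : Prop := out = pick_latest_by_period_alt rows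
instance (rows : List (List (String × String))) (out : List (String × List (String × String))) : Decidable (Spec_pick_latest_by_period rows out) := by unfold Spec_pick_latest_by_period; infer_instance

-- ===== CLAIM (what is proved, stated in full; the proofs are below) =====
def Claim_equal_pick_latest_by_period : Prop := ∀ (rows : List (List (String × String))), Dom_pick_latest_by_period rows → Spec_pick_latest_by_period rows (pick_latest_by_period rows)

-- ===== LEMMAS AND PROOFS =====

def pvF (p : String × List (List (String × String))) : String × List (String × String) :=
  (p.1, pvMaxByFiled p.2)

def pvStepA (best : PySem.Dict String (List (String × String))) (r : List (String × String)) :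
    PySem.Dict String (List (String × String)) :=
  let filed := pvFiled r
  match (PySem.Dict.mk r).get? "end" with
  | none => best
  | some e =>
    if e = "" then best
    else
      match best.get? e with
      | none => best.insert e r
      | some b => if pvFiled b < filed then best.insert e r else best

def pvStepB (d : PySem.Dict String (List (List (String × String)))) (r : List (String × String)) :
    PySem.Dict String (List (List (String × String))) :=
  match (PySem.Dict.mk r).get? "end" with
  | none => d
  | some e => if e = "" then d else d.modify e [] (· ++ [r])

theorem pvMax_append (g : List (List (String × String))) (r : List (String × String)) (hg : g ≠ []) :
    pvMaxByFiled (g ++ [r]) =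
      if pvFiled (pvMaxByFiled g) < pvFiled r then r else pvMaxByFiled g := by
  cases g with
  | nil => exact absurd rfl hg
  | cons h t => simp [pvMaxByFiled, List.foldl_append]

theorem pvGet?_map_F (B : PySem.Dict String (List (String × String)))
    (G : PySem.Dict String (List (List (String × String))))
    (hB : B.items = G.items.map pvF) (e : String) :
    B.get? e = (G.get? e).map pvMaxByFiled := by
  simp only [PySem.Dict.get?, hB, List.find?_map]
  have : ((fun p : String × List (String × String) => p.1 == e) ∘ pvF)
      = (fun p : String × List (List (String × String)) => p.1 == e) := by
    funext p; rfl
  rw [this]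
  cases G.items.find? (fun p => p.1 == e) <;> rfl

theorem pvFind?_unique {α : Type} (l : List (String × α)) (e : String) (p : String × α)
    (hnd : (l.map Prod.fst).Nodup) (hf : l.find? (fun q => q.1 == e) = some p) :
    ∀ q ∈ l, q.1 = e → q = p := by
  induction l with
  | nil => simp at hf
  | cons h t ih =>
    simp only [List.map_cons, List.nodup_cons] at hnd
    intro q hq hqe
    by_cases hh : h.1 = e
    · have hhp : h = p := by
        rw [List.find?_cons_of_pos (by simpa using hh)] at hf
        exact Option.some_inj.mp hf
      rcases List.mem_cons.mp hq with rfl | hq'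
      · exact hhp
      · have hmem : h.1 ∈ t.map Prod.fst := by
          rw [hh, ← hqe]; exact List.mem_map_of_mem hq'
        exact absurd hmem hnd.1
    · have hf' : t.find? (fun q => q.1 == e) = some p := by
        rwa [List.find?_cons_of_neg (by simpa using hh)] at hf
      rcases List.mem_cons.mp hq with rfl | hq'
      · exact absurd hqe hh
      · exact ih hnd.2 hf' q hq' hqe

theorem pvMain (rows : List (List (String × String)))
    (G : PySem.Dict String (List (List (String × String))))
    (B : PySem.Dict String (List (String × String)))
    (hnd : (G.items.map Prod.fst).Nodup)
    (hne : ∀ p ∈ G.items, p.2 ≠ [])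
    (hB : B.items = G.items.map pvF) :
    (rows.foldl pvStepA B).items = ((rows.foldl pvStepB G).items).map pvF := by
  induction rows generalizing G B with
  | nil => simpa using hB
  | cons r rows ih =>
    simp only [List.foldl_cons]
    rcases he : (PySem.Dict.mk r).get? "end" with _ | e
    · simpa [pvStepA, pvStepB, he] using ih G B hnd hne hB
    · by_cases he0 : e = ""
      · simpa [pvStepA, pvStepB, he, he0] using ih G B hnd hne hB
      · rcases hg : G.get? e with _ | g
        · -- fresh key: both append
          have hBg : B.get? e = none := by rw [pvGet?_map_F B G hB, hg]; rfl
          have hGc : G.contains e = false := by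
            rw [PySem.Dict.contains_eq_isSome_get?, hg]; rfl
          have hBc : B.contains e = false := by
            rw [PySem.Dict.contains_eq_isSome_get?, hBg]; rfl
          have hmod : G.modify e [] (· ++ [r]) = G.insert e [r] := by
            simp [PySem.Dict.modify, PySem.Dict.getD_eq_get?_getD, hg]
          simp only [pvStepA, pvStepB, he, if_neg he0, hBg, hmod]
          apply ih
          · rw [PySem.Dict.items_insert_of_not_contains _ _ hGc]
            simp only [List.map_append, List.map_cons, List.map_nil, List.nodup_append]
            refine ⟨hnd, List.nodup_singleton _, ?_⟩
            intro a ha b hb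
            rw [List.mem_singleton] at hb
            subst hb
            rintro rfl
            rw [← PySem.Dict.keys] at ha
            exact absurd ((PySem.Dict.contains_iff_mem_keys G a).mpr ha) (by simp [hGc])
          · intro p hp
            rw [PySem.Dict.items_insert_of_not_contains _ _ hGc] at hp
            rcases List.mem_append.mp hp with hp | hp
            · exact hne p hp
            · simp only [List.mem_singleton] at hp; subst hp; simp
          · rw [PySem.Dict.items_insert_of_not_contains _ _ hGc,
                PySem.Dict.items_insert_of_not_contains _ _ hBc, hB, List.map_append]
            rfl
        · -- existing key
          have hBg : B.get? e = some (pvMaxByFiled g) := by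
            rw [pvGet?_map_F B G hB, hg]; rfl
          have hGc : G.contains e = true := by
            rw [PySem.Dict.contains_eq_isSome_get?, hg]; rfl
          have hBc : B.contains e = true := by
            rw [PySem.Dict.contains_eq_isSome_get?, hBg]; rfl
          -- the found pair and nonemptiness of g
          obtain ⟨q, hfq, hq2⟩ : ∃ q, G.items.find? (fun p => p.1 == e) = some q ∧ q.2 = g := by
            rcases Option.map_eq_some_iff.mp hg with ⟨q, hq, hq2⟩
            exact ⟨q, hq, hq2⟩
          have hgne : g ≠ [] := by
            subst hq2
            exact hne q (List.mem_of_find?_eq_some hfq)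
          have hmod : G.modify e [] (· ++ [r]) = G.insert e (g ++ [r]) := by
            simp [PySem.Dict.modify, PySem.Dict.getD_eq_get?_getD, hg]
          have hmax := pvMax_append g r hgne
          -- invariants for the updated G
          have hnd' : (((G.insert e (g ++ [r])).items).map Prod.fst).Nodup := by
            rw [PySem.Dict.items_insert_of_contains _ _ hGc]
            have : ((G.items.map fun p => if p.1 == e then (e, g ++ [r]) else p).map Prod.fst)
                = G.items.map Prod.fst := by
              rw [List.map_map]
              apply List.map_congr_left
              intro a _
              by_cases h : a.1 = e <;> simp [h]
            rw [this]; exact hnd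
          have hne' : ∀ p ∈ (G.insert e (g ++ [r])).items, p.2 ≠ [] := by
            rw [PySem.Dict.items_insert_of_contains _ _ hGc]
            intro p hp
            rcases List.mem_map.mp hp with ⟨a, ha, hap⟩
            by_cases h : a.1 = e
            · simp only [h, beq_self_eq_true, if_true] at hap
              subst hap; simp
            · simp only [show (a.1 == e) = false by simpa using h, Bool.false_eq_true,
                if_false] at hap
              subst hap; exact hne a ha
          simp only [pvStepA, pvStepB, he, if_neg he0, hBg, hmod]
          by_cases hc : pvFiled (pvMaxByFiled g) < pvFiled r
          · rw [if_pos hc]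
            apply ih _ _ hnd' hne'
            rw [PySem.Dict.items_insert_of_contains _ _ hBc,
                PySem.Dict.items_insert_of_contains _ _ hGc, hB,
                List.map_map, List.map_map]
            apply List.map_congr_left
            intro a _
            by_cases h : a.1 = e
            · simp [pvF, h, hmax, hc]
            · simp [pvF, h]
          · rw [if_neg hc]
            apply ih _ _ hnd' hne'
            rw [PySem.Dict.items_insert_of_contains _ _ hGc, hB, List.map_map]
            apply List.map_congr_left
            intro a ha
            by_cases h : a.1 = e
            · have haq : a = q := pvFind?_unique G.items e q hnd hfq a ha h
              subst haq
              simp [pvF, h, hq2, hmax, hc]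
            · simp [pvF, h]

-- ===== VERDICT (by name: the statement is the Claim_ definition above) =====
theorem pick_latest_by_period_spec : Claim_equal_pick_latest_by_period := by
  intro rows _
  unfold Spec_pick_latest_by_period pick_latest_by_period pick_latest_by_period_alt
  exact pvMain rows PySem.Dict.empty PySem.Dict.empty (by simp [PySem.Dict.empty]) (by simp [PySem.Dict.empty]) rfl
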